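-- pv_equiv track=rewrite | github.com/jjoshua2/arc_agi | unsolved/2025-10-13T00-42-36Z/a8d7556c_best1.py | transform
-- ===== SOURCE A (Python) =====
-- def transform(grid_lst: list[list[int]]) -> list[list[int]]:
--     if not grid_lst:
--         return []
--     rows = len(grid_lst)
--     cols = len(grid_lst[0])
--     output = [row[:] for row in grid_lst]
--     for r in range(rows - 1):
--         for c in range(cols - 1):
--             if (grid_lst[r][c] == 0 and
--                 grid_lst[r][c + 1] == 0 and
--                 grid_lst[r + 1][c] == 0 and
--                 grid_lst[r + 1][c + 1] == 0):
--                 output[r][c] = 2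
--                 output[r][c + 1] = 2
--                 output[r + 1][c] = 2
--                 output[r + 1][c + 1] = 2
--     return output
-- ===== SOURCE B (Python) =====
-- def transform(grid_lst: list[list[int]]) -> list[list[int]]:
--     if not grid_lst:
--         return []
--     rows = len(grid_lst)
--     cols = len(grid_lst[0])
--     is_block = [[all(grid_lst[r + dr][c + dc] == 0 for dr in (0, 1) for dc in (0, 1))
--                  for c in range(cols - 1)]
--                 for r in range(rows - 1)]
--
--     def covered(i, j):
--         for r in (i - 1, i):
--             for c in (j - 1, j):
--                 if 0 <= r < rows - 1 and 0 <= c < cols - 1 and is_block[r][c]: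
--                     return True
--         return False
--
--     return [[2 if covered(i, j) else v for j, v in enumerate(row)]
--             for i, row in enumerate(grid_lst)]
-- ===== Notes on version B (the rewrite author's own statement) =====
-- stated objective: alternative
-- what changed: Replaces A's in-place painting of four cells per qualifying window with a two-phase computation: first build a boolean table is_block[r][c] of all-zero 2x2 windows, then rebuild the grid functionally, each output cell queried against the (up to four) windows that contain it; no intermediate mutation.
import Mathlib
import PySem

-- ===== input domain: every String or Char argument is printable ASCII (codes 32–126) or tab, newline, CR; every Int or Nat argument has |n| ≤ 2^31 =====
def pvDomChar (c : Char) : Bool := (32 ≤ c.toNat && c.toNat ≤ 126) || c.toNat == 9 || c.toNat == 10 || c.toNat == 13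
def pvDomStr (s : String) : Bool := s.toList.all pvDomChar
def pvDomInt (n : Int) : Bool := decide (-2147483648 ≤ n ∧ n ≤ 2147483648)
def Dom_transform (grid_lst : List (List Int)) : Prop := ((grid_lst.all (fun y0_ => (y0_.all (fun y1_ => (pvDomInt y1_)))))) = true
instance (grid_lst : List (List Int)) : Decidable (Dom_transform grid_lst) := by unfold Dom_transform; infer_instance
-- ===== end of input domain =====

-- B replaces A's per-window four-cell painting with a window table plus a per-cell query
-- (alternative decomposition, same asymptotic cost); neither implementation mutates its input.

-- ===== PORT A =====
-- grid[r][c] (indices produced by range(), hence in range under Pre_)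
def cellA (g : List (List Int)) (r c : Nat) : Int := (g.getD r []).getD c 0

-- output[r][c] = v
def setCell (out : List (List Int)) (r c : Nat) (v : Int) : List (List Int) :=
  out.set r ((out.getD r []).set c v)

-- the four assignments A performs for a qualifying window
def paint (out : List (List Int)) (r c : Nat) : List (List Int) :=
  setCell (setCell (setCell (setCell out r c 2) r (c+1) 2) (r+1) c 2) (r+1) (c+1) 2

def transform (grid_lst : List (List Int)) : List (List Int) :=
  if grid_lst = [] then []
  else
    (List.range (grid_lst.length - 1)).foldl (fun out r =>
      (List.range ((grid_lst.headD []).length - 1)).foldl (fun out c =>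
        if cellA grid_lst r c = 0 ∧ cellA grid_lst r (c+1) = 0 ∧
           cellA grid_lst (r+1) c = 0 ∧ cellA grid_lst (r+1) (c+1) = 0 then
          paint out r c
        else out) out) grid_lst

-- ===== PORT B =====
-- is a 2x2 all-zero window anchored at (r,c)?  (the all(...) in Source B)
def blockB (g : List (List Int)) (r c : Nat) : Bool :=
  decide (cellA g r c = 0 ∧ cellA g r (c+1) = 0 ∧
          cellA g (r+1) c = 0 ∧ cellA g (r+1) (c+1) = 0)

-- one row of Source B's is_block table
def blockRow (g : List (List Int)) (r cols : Nat) : List Bool :=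
  (List.range (cols - 1)).map (fun c => blockB g r c)

-- Source B's covered(i, j): any in-range window containing (i,j) that is marked in the table
def coveredAt (isBlock : List (List Bool)) (rows cols : Nat) (i j : Int) : Bool :=
  [i - 1, i].any (fun r => [j - 1, j].any (fun c =>
    decide (0 ≤ r ∧ r < (rows : Int) - 1 ∧ 0 ≤ c ∧ c < (cols : Int) - 1) &&
    (isBlock.getD r.toNat []).getD c.toNat false))

def transform_alt (grid_lst : List (List Int)) : List (List Int) :=
  if grid_lst = [] then []
  else
    let rows := grid_lst.length
    let cols := (grid_lst.headD []).length
    let isBlock := (List.range (rows - 1)).map (fun r => blockRow grid_lst r cols)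
    (PySem.List.enumerate grid_lst 0).map (fun p =>
      (PySem.List.enumerate p.2 0).map (fun q =>
        if coveredAt isBlock rows cols p.1 q.1 then 2 else q.2))

-- ===== PRECONDITION & SPEC =====
-- Pre_ excludes exactly the ragged grids on which A raises IndexError: the window scan reaches
-- an index beyond the end of a row shorter than the first row before `and` short-circuits.
def Pre_transform (grid_lst : List (List Int)) : Prop :=
  grid_lst.length ≤ 1 ∨ (grid_lst.headD []).length ≤ 1 ∨
    ∀ r ∈ List.range (grid_lst.length - 1), ∀ c ∈ List.range ((grid_lst.headD []).length - 1),
      c < (grid_lst.getD r []).length ∧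
      ((grid_lst.getD r []).getD c 0 = 0 →
        c + 1 < (grid_lst.getD r []).length ∧
        ((grid_lst.getD r []).getD (c+1) 0 = 0 →
          c < (grid_lst.getD (r+1) []).length ∧
          ((grid_lst.getD (r+1) []).getD c 0 = 0 →
            c + 1 < (grid_lst.getD (r+1) []).length)))
instance (grid_lst : List (List Int)) : Decidable (Pre_transform grid_lst) := by
  unfold Pre_transform; infer_instance

def pvWitness_transform : List (List Int) := [[0, 0, 1], [0, 0, 3], [1, 2, 3]]

def Spec_transform (grid_lst : List (List Int)) (out : List (List Int)) : Prop := out = transform_alt grid_lst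
instance (grid_lst : List (List Int)) (out : List (List Int)) : Decidable (Spec_transform grid_lst out) := by unfold Spec_transform; infer_instance

-- ===== CLAIM (what is proved, stated in full; the proofs are below) =====
def Claim_equal_transform : Prop := ∀ (grid_lst : List (List Int)), Dom_transform grid_lst → Pre_transform grid_lst → Spec_transform grid_lst (transform grid_lst)

-- ===== LEMMAS AND PROOFS =====

-- A's loop body over one flattened (r,c) pair
def stepA (g : List (List Int)) (out : List (List Int)) (p : Nat × Nat) : List (List Int) :=
  if cellA g p.1 p.2 = 0 ∧ cellA g p.1 (p.2+1) = 0 ∧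
     cellA g (p.1+1) p.2 = 0 ∧ cellA g (p.1+1) (p.2+1) = 0 then
    paint out p.1 p.2
  else out

-- does the window anchored at p qualify and cover cell (i,j)?
def covB (g : List (List Int)) (p : Nat × Nat) (i j : Nat) : Bool :=
  blockB g p.1 p.2 && (decide (i = p.1 ∨ i = p.1 + 1) && decide (j = p.2 ∨ j = p.2 + 1))

def prodL (n m : Nat) : List (Nat × Nat) :=
  (List.range n).flatMap (fun r => (List.range m).map (fun c => (r, c)))

lemma mem_prodL {n m : Nat} {p : Nat × Nat} : p ∈ prodL n m ↔ p.1 < n ∧ p.2 < m := by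
  cases p with
  | mk r c =>
    simp only [prodL, List.mem_flatMap, List.mem_map, List.mem_range, Prod.mk.injEq]
    constructor
    · rintro ⟨a, ha, b, hb, h1, h2⟩; subst h1; subst h2; exact ⟨ha, hb⟩
    · rintro ⟨h1, h2⟩; exact ⟨r, h1, ⟨c, h2, rfl, rfl⟩⟩

lemma transform_eq_fold (g : List (List Int)) (h : g ≠ []) :
    transform g = (prodL (g.length - 1) ((g.headD []).length - 1)).foldl (stepA g) g := by
  simp only [transform, if_neg h, prodL, List.foldl_flatMap, List.foldl_map, stepA]

lemma setCell_length (out : List (List Int)) (r c : Nat) (v : Int) :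
    (setCell out r c v).length = out.length := by
  simp [setCell]

lemma setCell_rowlen (out : List (List Int)) (r c : Nat) (v : Int) (i : Nat) :
    ((setCell out r c v).getD i []).length = (out.getD i []).length := by
  by_cases hr : r < out.length
  · simp only [setCell, List.getD_eq_getElem?_getD, List.getElem?_set, hr, if_pos]
    split_ifs with h
    · subst h; simp [List.getD_eq_getElem?_getD]
    · rfl
  · unfold setCell
    rw [List.set_eq_of_length_le (Nat.le_of_not_lt hr)]

lemma setCell_cell (out : List (List Int)) (r c : Nat) (v : Int) (i j : Nat)
    (hr : r < out.length) (hc : c < (out.getD r []).length) :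
    cellA (setCell out r c v) i j = if i = r ∧ j = c then v else cellA out i j := by
  simp only [cellA, setCell, List.getD_eq_getElem?_getD, List.getElem?_set, hr]
  by_cases hir : r = i
  · subst hir
    simp only [if_pos rfl]
    by_cases hjc : c = j
    · subst hjc
      simp only [List.getElem?_set]
      have : c < ((out[r]?).getD []).length := by
        simpa [List.getD_eq_getElem?_getD] using hc
      simp_all [List.getElem?_eq_getElem, List.getD_eq_getElem?_getD]
    · simp_all [List.getElem?_set]
      intro h; omega
  · simp_all [if_neg hir]
    intro h; omega

lemma paint_cell (out : List (List Int)) (r c : Nat) (i j : Nat)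
    (hr : r + 1 < out.length)
    (hc0 : c + 1 < (out.getD r []).length) (hc1 : c + 1 < (out.getD (r+1) []).length) :
    cellA (paint out r c) i j =
      if (i = r ∨ i = r + 1) ∧ (j = c ∨ j = c + 1) then 2 else cellA out i j := by
  have l1 : r < out.length := by omega
  unfold paint
  rw [setCell_cell _ _ _ _ _ _
        (by simp [setCell_length]; omega)
        (by rw [setCell_rowlen, setCell_rowlen, setCell_rowlen]; omega),
      setCell_cell _ _ _ _ _ _
        (by simp [setCell_length]; omega)
        (by rw [setCell_rowlen, setCell_rowlen]; omega),
      setCell_cell _ _ _ _ _ _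
        (by simp [setCell_length]; omega)
        (by rw [setCell_rowlen]; omega),
      setCell_cell _ _ _ _ _ _ l1 (by omega)]
  split_ifs <;> tauto

lemma stepA_length (g out : List (List Int)) (p : Nat × Nat) :
    (stepA g out p).length = out.length := by
  unfold stepA paint; split_ifs <;> simp [setCell_length]

lemma stepA_rowlen (g out : List (List Int)) (p : Nat × Nat) (i : Nat) :
    ((stepA g out p).getD i []).length = (out.getD i []).length := by
  unfold stepA paint
  split_ifs
  · rw [setCell_rowlen, setCell_rowlen, setCell_rowlen, setCell_rowlen]
  · rfl

lemma fold_length (g : List (List Int)) (L : List (Nat × Nat)) (out : List (List Int)) :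
    (L.foldl (stepA g) out).length = out.length := by
  induction L generalizing out with
  | nil => rfl
  | cons p L ih => rw [List.foldl_cons, ih, stepA_length]

lemma fold_rowlen (g : List (List Int)) (L : List (Nat × Nat)) (out : List (List Int)) (i : Nat) :
    ((L.foldl (stepA g) out).getD i []).length = (out.getD i []).length := by
  induction L generalizing out with
  | nil => rfl
  | cons p L ih => rw [List.foldl_cons, ih, stepA_rowlen]

lemma fold_cell (g : List (List Int)) (L : List (Nat × Nat)) (out : List (List Int))
    (hlen : out.length = g.length)
    (hrow : ∀ i, (out.getD i []).length = (g.getD i []).length)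
    (hL : ∀ p ∈ L, p.1 + 1 < g.length ∧
            ((cellA g p.1 p.2 = 0 ∧ cellA g p.1 (p.2+1) = 0 ∧
              cellA g (p.1+1) p.2 = 0 ∧ cellA g (p.1+1) (p.2+1) = 0) →
              p.2 + 1 < (g.getD p.1 []).length ∧ p.2 + 1 < (g.getD (p.1+1) []).length))
    (i j : Nat) :
    cellA (L.foldl (stepA g) out) i j =
      if L.any (fun p => covB g p i j) then 2 else cellA out i j := by
  induction L generalizing out with
  | nil => simp
  | cons p L ih =>
    have hp := hL p (List.mem_cons_self ..)
    have hstep : cellA (stepA g out p) i j =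
        if covB g p i j then 2 else cellA out i j := by
      unfold stepA
      by_cases hb : cellA g p.1 p.2 = 0 ∧ cellA g p.1 (p.2+1) = 0 ∧
          cellA g (p.1+1) p.2 = 0 ∧ cellA g (p.1+1) (p.2+1) = 0
      · obtain ⟨b1, b2⟩ := hp.2 hb
        rw [if_pos hb, paint_cell _ _ _ _ _ (by omega) (by rw [hrow]; exact b1)
              (by rw [hrow]; exact b2)]
        simp [covB, blockB, hb]
      · rw [if_neg hb]
        simp [covB, blockB, hb]
    rw [List.foldl_cons,
        ih (stepA g out p) (by rw [stepA_length, hlen])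
          (fun k => by rw [stepA_rowlen, hrow])
          (fun q hq => hL q (List.mem_cons_of_mem _ hq)),
        hstep]
    simp only [List.any_cons]
    by_cases h2 : covB g p i j = true <;>
      by_cases h1 : L.any (fun p => covB g p i j) = true <;> simp [h1, h2]

lemma isBlock_lookup (g : List (List Int)) (rows cols r c : Nat)
    (hr : r < rows - 1) (hc : c < cols - 1) :
    ((((List.range (rows - 1)).map (fun r => blockRow g r cols)).getD r []).getD c false) =
      blockB g r c := by
  have h1 : ((List.range (rows - 1)).map (fun r => blockRow g r cols)).getD r []
      = blockRow g r cols := by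
    rw [List.getD_eq_getElem _ _ (by simpa using hr)]
    simp
  rw [h1, blockRow, List.getD_eq_getElem _ _ (by simpa using hc)]
  simp

lemma covered_eq_any (g : List (List Int)) (rows cols i j : Nat) :
    coveredAt ((List.range (rows - 1)).map (fun r => blockRow g r cols)) rows cols
        (i : Int) (j : Int) =
      (prodL (rows - 1) (cols - 1)).any (fun p => covB g p i j) := by
  rw [Bool.eq_iff_iff]
  simp only [coveredAt, List.any_eq_true, List.mem_cons, List.not_mem_nil, or_false,
    Bool.and_eq_true, decide_eq_true_eq]
  constructor
  · rintro ⟨r, hrm, c, hcm, ⟨hr0, hr1, hc0, hc1⟩, hblk⟩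
    have hrn : r.toNat < rows - 1 := by omega
    have hcn : c.toNat < cols - 1 := by omega
    refine ⟨(r.toNat, c.toNat), mem_prodL.mpr ⟨hrn, hcn⟩, ?_⟩
    rw [isBlock_lookup g rows cols _ _ hrn hcn] at hblk
    simp only [covB, Bool.and_eq_true, decide_eq_true_eq]
    refine ⟨hblk, ?_, ?_⟩ <;> rcases hrm with h | h <;> rcases hcm with h' | h' <;> omega
  · rintro ⟨p, hpm, hcov⟩
    obtain ⟨hp1, hp2⟩ := mem_prodL.mp hpm
    simp only [covB, Bool.and_eq_true, decide_eq_true_eq] at hcov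
    obtain ⟨hblk, hi, hj⟩ := hcov
    refine ⟨(p.1 : Int), by omega, (p.2 : Int), by omega, ⟨by omega, by omega, by omega, by omega⟩, ?_⟩
    simp only [Int.toNat_natCast]
    rw [isBlock_lookup g rows cols _ _ hp1 hp2]
    exact hblk

lemma alt_length (g : List (List Int)) : (transform_alt g).length = g.length := by
  by_cases h : g = []
  · simp [transform_alt, h]
  · simp [transform_alt, if_neg h, PySem.List.length_enumerate]

lemma alt_rowlen (g : List (List Int)) (i : Nat) :
    ((transform_alt g).getD i []).length = (g.getD i []).length := by
  by_cases h : g = []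
  · simp [transform_alt, h]
  by_cases hi : i < g.length
  · rw [List.getD_eq_getElem _ _ (by rw [alt_length]; exact hi),
        List.getD_eq_getElem _ _ hi]
    simp only [transform_alt, if_neg h, List.getElem_map, PySem.List.getElem_enumerate]
    simp [PySem.List.length_enumerate]
  · rw [List.getD_eq_default _ _ (by rw [alt_length]; omega),
        List.getD_eq_default _ _ (by omega)]

lemma cell_eq_getElem (out : List (List Int)) (i j : Nat) (hi : i < out.length)
    (hj : j < out[i].length) : out[i][j] = cellA out i j := by
  rw [cellA, List.getD_eq_getElem _ _ hi, List.getD_eq_getElem _ _ hj]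

lemma alt_cell (g : List (List Int)) (h : g ≠ []) (i j : Nat)
    (hi : i < g.length) (hj : j < (g.getD i []).length) :
    cellA (transform_alt g) i j =
      if coveredAt ((List.range (g.length - 1)).map (fun r => blockRow g r ((g.headD []).length)))
          g.length ((g.headD []).length) (i : Int) (j : Int) then 2 else cellA g i j := by
  have hj' : j < g[i].length := by rwa [List.getD_eq_getElem _ _ hi] at hj
  have hi2 : i < (transform_alt g).length := by rw [alt_length]; exact hi
  have hj2 : j < ((transform_alt g).getD i []).length := by rw [alt_rowlen]; exact hj
  have hj3 : j < (transform_alt g)[i].length := by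
    rwa [List.getD_eq_getElem _ _ hi2] at hj2
  rw [← cell_eq_getElem _ _ _ hi2 hj3]
  simp only [transform_alt, if_neg h, List.getElem_map, PySem.List.getElem_enumerate, zero_add]
  rw [cell_eq_getElem g i j hi hj']

-- ===== VERDICT (by name: the statement is the Claim_ definition above) =====
theorem transform_spec : Claim_equal_transform := by
  intro g _ hpre
  unfold Spec_transform
  by_cases hg : g = []
  · subst hg; rfl
  rw [transform_eq_fold g hg]
  have hL : ∀ p ∈ prodL (g.length - 1) ((g.headD []).length - 1),
      p.1 + 1 < g.length ∧
        ((cellA g p.1 p.2 = 0 ∧ cellA g p.1 (p.2+1) = 0 ∧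
          cellA g (p.1+1) p.2 = 0 ∧ cellA g (p.1+1) (p.2+1) = 0) →
          p.2 + 1 < (g.getD p.1 []).length ∧ p.2 + 1 < (g.getD (p.1+1) []).length) := by
    intro p hp
    obtain ⟨h1, h2⟩ := mem_prodL.mp hp
    have hsafe : p.2 < (g.getD p.1 []).length ∧
        ((g.getD p.1 []).getD p.2 0 = 0 →
          p.2 + 1 < (g.getD p.1 []).length ∧
          ((g.getD p.1 []).getD (p.2+1) 0 = 0 →
            p.2 < (g.getD (p.1+1) []).length ∧
            ((g.getD (p.1+1) []).getD p.2 0 = 0 →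
              p.2 + 1 < (g.getD (p.1+1) []).length))) := by
      rcases hpre with h | h | h
      · omega
      · omega
      · exact h p.1 (List.mem_range.mpr h1) p.2 (List.mem_range.mpr h2)
    refine ⟨by omega, fun hb => ?_⟩
    obtain ⟨hb1, hb2, hb3, hb4⟩ := hb
    simp only [cellA] at hb1 hb2 hb3 hb4
    obtain ⟨s0, s1⟩ := hsafe
    obtain ⟨t1, t2⟩ := s1 hb1
    obtain ⟨u1, u2⟩ := t2 hb2
    exact ⟨t1, u2 hb3⟩
  apply List.ext_getElem
  · rw [fold_length, alt_length]
  intro i hi1 hi2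
  have hig : i < g.length := by rwa [fold_length] at hi1
  apply List.ext_getElem
  · have h1 : ((prodL (g.length - 1) ((g.headD []).length - 1)).foldl (stepA g) g)[i] =
        ((prodL (g.length - 1) ((g.headD []).length - 1)).foldl (stepA g) g).getD i [] :=
      (List.getD_eq_getElem _ _ hi1).symm
    have h2 : (transform_alt g)[i] = (transform_alt g).getD i [] :=
      (List.getD_eq_getElem _ _ hi2).symm
    rw [h1, h2, fold_rowlen, alt_rowlen]
  intro j hj1 hj2
  have hjg : j < (g.getD i []).length := by
    have h1 : ((prodL (g.length - 1) ((g.headD []).length - 1)).foldl (stepA g) g)[i] =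
        ((prodL (g.length - 1) ((g.headD []).length - 1)).foldl (stepA g) g).getD i [] :=
      (List.getD_eq_getElem _ _ hi1).symm
    rwa [h1, fold_rowlen] at hj1
  rw [cell_eq_getElem _ _ _ hi1 hj1, cell_eq_getElem _ _ _ hi2 hj2]
  rw [fold_cell g _ g rfl (fun _ => rfl) hL i j]
  rw [alt_cell g hg i j hig hjg]
  rw [covered_eq_any g g.length ((g.headD []).length) i j]
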